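-- pv_equiv track=rewrite | github.com/ZaifSenpai/Batch-Py-Remux | pyRemux/ResetStyle.py | getAfterStr
-- ===== SOURCE A (Python) =====
-- def getAfterStr(line, StylePos):
-- 	pos=0
-- 	splitList = line.split(',')
--
-- 	for i in range(len(splitList)):
-- 		pos = pos + len(splitList[i]) + 1
--
-- 		if i == StylePos:
-- 			break
--
-- 	return ',' + line[pos:]
-- ===== SOURCE B (Python) =====
-- def getAfterStr(line, StylePos):
--     if StylePos < 0:
--         return ','
--     parts = line.split(',', StylePos + 1)
--     if len(parts) == StylePos + 2:
--         return ',' + parts[-1]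
--     return ','
-- ===== Notes on version B (the rewrite author's own statement) =====
-- stated objective: simpler
-- what changed: B replaces A's full split plus an index loop summing field lengths to recover a character offset by a single maxsplit-bounded split whose last piece IS the tail, read off directly (no loop, no offset arithmetic).
import Mathlib
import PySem

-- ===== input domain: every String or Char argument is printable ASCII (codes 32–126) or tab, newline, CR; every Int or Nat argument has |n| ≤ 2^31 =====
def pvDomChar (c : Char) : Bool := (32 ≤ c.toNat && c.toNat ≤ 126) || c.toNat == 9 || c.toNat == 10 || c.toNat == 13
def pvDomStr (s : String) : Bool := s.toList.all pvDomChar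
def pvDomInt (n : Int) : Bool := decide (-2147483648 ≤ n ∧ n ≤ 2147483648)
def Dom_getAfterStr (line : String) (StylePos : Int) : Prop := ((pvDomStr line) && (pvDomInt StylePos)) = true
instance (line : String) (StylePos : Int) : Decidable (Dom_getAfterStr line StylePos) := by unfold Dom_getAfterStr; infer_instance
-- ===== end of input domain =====

-- B replaces A's full split + index loop (summing field lengths to recover an offset) by one
-- maxsplit-bounded split whose last piece is read off directly; same values everywhere.

-- ===== PORT A =====
-- 'for i in range(len(splitList)): pos = pos + len(splitList[i]) + 1; if i == StylePos: break'
def pvALoop (StylePos : Int) : List (List Char) → Int → Int → Int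
  | [], _, pos => pos
  | s :: rest, i, pos =>
    let pos' := pos + (s.length : Int) + 1
    if i = StylePos then pos' else pvALoop StylePos rest (i + 1) pos'

-- "',' + line[pos:]" is built as a char list (exact for Python str concatenation of "," and the slice)
def getAfterStr (line : String) (StylePos : Int) : String :=
  let splitList := PySem.Chars.splitOn line.toList [',']
  let pos := pvALoop StylePos splitList 0 0
  String.ofList (',' :: PySem.List.slice line.toList (some pos) none)

-- ===== PORT B =====
def getAfterStr_alt (line : String) (StylePos : Int) : String :=
  if StylePos < 0 then ","
  else
    let parts := PySem.Chars.splitOnMax line.toList [','] (StylePos + 1)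
    if (parts.length : Int) = StylePos + 2 then
      String.ofList (',' :: PySem.List.pyGetD parts (-1) [])
    else ","

-- ===== PRECONDITION & SPEC =====
def Spec_getAfterStr (line : String) (StylePos : Int) (out : String) : Prop := out = getAfterStr_alt line StylePos
instance (line : String) (StylePos : Int) (out : String) : Decidable (Spec_getAfterStr line StylePos out) := by unfold Spec_getAfterStr; infer_instance

-- ===== CLAIM (what is proved, stated in full; the proofs are below) =====
def Claim_equal_getAfterStr : Prop := ∀ (line : String) (StylePos : Int), Dom_getAfterStr line StylePos → Spec_getAfterStr line StylePos (getAfterStr line StylePos)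

-- ===== LEMMAS AND PROOFS =====

-- structural characterisation of split(',') on a char list
def pvSp : List Char → List (List Char)
  | [] => [[]]
  | c :: rest => if c = ',' then [] :: pvSp rest else (pvSp rest).modifyHead (c :: ·)

-- structural characterisation of split(',', m)
def pvSpm : Nat → List Char → List (List Char)
  | _, [] => [[]]
  | 0, l => [l]
  | m + 1, c :: rest => if c = ',' then [] :: pvSpm m rest else (pvSpm (m + 1) rest).modifyHead (c :: ·)

-- the common reference value: the tail of cs after its (k+1)-th comma, [] if there is none
def pvRefI : List Char → Int → List Char
  | [], _ => []
  | c :: rest, k => if c = ',' then (if k = 0 then rest else pvRefI rest (k - 1)) else pvRefI rest k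

lemma pvSp_ne_nil (cs : List Char) : pvSp cs ≠ [] := by
  cases cs with
  | nil => simp [pvSp]
  | cons c rest =>
    simp only [pvSp]
    split
    · simp
    · cases h : pvSp rest with
      | nil => exact absurd h (pvSp_ne_nil rest)
      | cons a t => simp [List.modifyHead]

lemma pvSpm_ne_nil (m : Nat) (cs : List Char) : pvSpm m cs ≠ [] := by
  cases cs with
  | nil => cases m <;> simp [pvSpm]
  | cons c rest =>
    cases m with
    | zero => simp [pvSpm]
    | succ m =>
      simp only [pvSpm]
      split
      · simp
      · cases h : pvSpm (m + 1) rest with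
        | nil => exact absurd h (pvSpm_ne_nil (m + 1) rest)
        | cons a t => simp [List.modifyHead]

lemma pvSpm_zero (l : List Char) : pvSpm 0 l = [l] := by
  cases l <;> rfl

lemma splitOn_go_spec : ∀ (l : List Char) (fuel : Nat) (cur : List Char) (acc : List (List Char)),
    l.length ≤ fuel →
    PySem.Chars.splitOn.go [','] fuel l cur acc = acc.reverse ++ (pvSp l).modifyHead (cur.reverse ++ ·) := by
  intro l
  induction l with
  | nil =>
    intro fuel cur acc _
    cases fuel <;> simp [PySem.Chars.splitOn.go, pvSp, List.modifyHead]
  | cons c rest ih =>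
    intro fuel cur acc hf
    cases fuel with
    | zero => simp at hf
    | succ f =>
      rw [PySem.Chars.splitOn.go.eq_def]
      simp only [List.isPrefixOf, Bool.and_true, List.length_cons, List.length_nil,
                 List.drop_succ_cons, List.drop_zero, beq_iff_eq]
      by_cases hc : c = ','
      · subst hc
        rw [if_pos rfl, ih f [] (cur.reverse :: acc) (by simp at hf; omega)]
        simp [pvSp, List.modifyHead]
        cases pvSp rest <;> rfl
      · rw [if_neg (Ne.symm hc), ih f (c :: cur) acc (by simp at hf; omega)]
        obtain ⟨h, t, hh⟩ := List.exists_cons_of_ne_nil (pvSp_ne_nil rest)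
        simp [pvSp, hc, hh, List.modifyHead]

lemma splitOn_eq_pvSp (cs : List Char) : PySem.Chars.splitOn cs [','] = pvSp cs := by
  rw [PySem.Chars.splitOn, splitOn_go_spec cs (cs.length + 1) [] [] (by omega)]
  obtain ⟨h, t, hh⟩ := List.exists_cons_of_ne_nil (pvSp_ne_nil cs)
  simp [hh, List.modifyHead]

lemma splitOnMax_go_spec : ∀ (l : List Char) (fuel m : Nat) (cur : List Char) (acc : List (List Char)),
    l.length ≤ fuel →
    PySem.Chars.splitOnMax.go [','] fuel m l cur acc = acc.reverse ++ (pvSpm m l).modifyHead (cur.reverse ++ ·) := by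
  intro l
  induction l with
  | nil =>
    intro fuel m cur acc _
    cases fuel <;> cases m <;> simp [PySem.Chars.splitOnMax.go, pvSpm, List.modifyHead]
  | cons c rest ih =>
    intro fuel m cur acc hf
    cases fuel with
    | zero => simp at hf
    | succ f =>
      rw [PySem.Chars.splitOnMax.go.eq_def]
      cases m with
      | zero => simp [pvSpm, List.modifyHead]
      | succ m =>
        simp only [List.isPrefixOf, Bool.and_true, List.length_cons, List.length_nil,
                   List.drop_succ_cons, List.drop_zero, beq_iff_eq, Nat.succ_ne_zero,
                   if_false, Nat.add_sub_cancel]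
        by_cases hc : c = ','
        · subst hc
          rw [if_pos rfl, ih f m [] (cur.reverse :: acc) (by simp at hf; omega)]
          simp [pvSpm, List.modifyHead]
          cases pvSpm m rest <;> rfl
        · rw [if_neg (Ne.symm hc), ih f (m + 1) (c :: cur) acc (by simp at hf; omega)]
          obtain ⟨h, t, hh⟩ := List.exists_cons_of_ne_nil (pvSpm_ne_nil (m + 1) rest)
          simp [pvSpm, hc, hh, List.modifyHead]

lemma splitOnMax_eq_pvSpm (cs : List Char) (m : Int) (hm : 0 ≤ m) :
    PySem.Chars.splitOnMax cs [','] m = pvSpm m.toNat cs := by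
  rw [PySem.Chars.splitOnMax, if_neg (by omega)]
  rw [splitOnMax_go_spec cs (cs.length + 1) m.toNat [] [] (by omega)]
  obtain ⟨h, t, hh⟩ := List.exists_cons_of_ne_nil (pvSpm_ne_nil m.toNat cs)
  simp [hh, List.modifyHead]

lemma pvALoop_offset (k : Int) : ∀ (parts : List (List Char)) (i pos : Int),
    pvALoop k parts i pos = pos + pvALoop k parts i 0 := by
  intro parts
  induction parts with
  | nil => intro i pos; simp [pvALoop]
  | cons s rest ih =>
    intro i pos
    simp only [pvALoop]
    split
    · ring
    · rw [ih (i + 1) (pos + s.length + 1), ih (i + 1) (0 + s.length + 1)]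
      ring

lemma pvALoop_shift (k : Int) : ∀ (parts : List (List Char)) (i pos : Int),
    pvALoop (k + 1) parts (i + 1) pos = pvALoop k parts i pos := by
  intro parts
  induction parts with
  | nil => intro i pos; simp [pvALoop]
  | cons s rest ih =>
    intro i pos
    simp only [pvALoop]
    by_cases h : i = k
    · rw [if_pos (by omega), if_pos h]
    · rw [if_neg (by omega), if_neg h, ih]

lemma pvALoop_nonneg (k : Int) : ∀ (parts : List (List Char)) (i pos : Int),
    0 ≤ pos → 0 ≤ pvALoop k parts i pos := by
  intro parts
  induction parts with
  | nil => intro i pos h; simpa [pvALoop]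
  | cons s rest ih =>
    intro i pos h
    simp only [pvALoop]
    split
    · positivity
    · exact ih (i + 1) _ (by positivity)

lemma pvALoop_modifyHead (k : Int) (c : Char) (h : List Char) (t : List (List Char)) (i pos : Int) :
    pvALoop k (List.modifyHead (c :: ·) (h :: t)) i pos = 1 + pvALoop k (h :: t) i pos := by
  simp only [List.modifyHead, pvALoop, List.length_cons]
  push_cast
  split
  · ring
  · rw [pvALoop_offset k t (i + 1) (pos + (↑h.length + 1) + 1),
        pvALoop_offset k t (i + 1) (pos + ↑h.length + 1)]
    ring

lemma pvRefI_neg : ∀ (cs : List Char) (k : Int), k < 0 → pvRefI cs k = [] := by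
  intro cs
  induction cs with
  | nil => intro k _; rfl
  | cons c rest ih =>
    intro k hk
    simp only [pvRefI]
    split
    · rw [if_neg (by omega)]
      exact ih (k - 1) (by omega)
    · exact ih k hk

lemma A_drop : ∀ (cs : List Char) (k : Int),
    List.drop (pvALoop k (pvSp cs) 0 0).toNat cs = pvRefI cs k := by
  intro cs
  induction cs with
  | nil => intro k; simp [pvRefI]
  | cons c rest ih =>
    intro k
    by_cases hc : c = ','
    · subst hc
      have hsp : pvSp (',' :: rest) = [] :: pvSp rest := by simp [pvSp]
      rw [hsp]
      simp only [pvALoop, List.length_nil, Nat.cast_zero, zero_add]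
      by_cases hk : (0 : Int) = k
      · rw [if_pos hk]
        simp [pvRefI, hk.symm]
      · rw [if_neg hk]
        have h1 : pvALoop k (pvSp rest) 1 1 = 1 + pvALoop (k - 1) (pvSp rest) 0 0 := by
          rw [pvALoop_offset k (pvSp rest) 1 1]
          have : pvALoop k (pvSp rest) 1 0 = pvALoop (k - 1) (pvSp rest) 0 0 := by
            have := pvALoop_shift (k - 1) (pvSp rest) 0 0
            simpa [sub_add_cancel] using this
          rw [this]
        rw [h1]
        have hx : 0 ≤ pvALoop (k - 1) (pvSp rest) 0 0 := pvALoop_nonneg _ _ _ _ le_rfl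
        have ht : (1 + pvALoop (k - 1) (pvSp rest) 0 0).toNat = (pvALoop (k - 1) (pvSp rest) 0 0).toNat + 1 := by omega
        rw [ht, List.drop_succ_cons, ih (k - 1)]
        simp [pvRefI, Ne.symm hk]
    · obtain ⟨h, t, hh⟩ := List.exists_cons_of_ne_nil (pvSp_ne_nil rest)
      simp only [pvSp, if_neg hc, hh, pvALoop_modifyHead]
      have ht : (1 + pvALoop k (h :: t) 0 0).toNat = (pvALoop k (h :: t) 0 0).toNat + 1 := by
        have hx : 0 ≤ pvALoop k (h :: t) 0 0 := pvALoop_nonneg _ _ _ _ le_rfl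
        omega
      rw [ht, List.drop_succ_cons, ← hh, ih k]
      simp [pvRefI, hc]

lemma pvRefI_comma (rest : List Char) (k : Int) (hk : k ≠ 0) :
    pvRefI (',' :: rest) k = pvRefI rest (k - 1) := by
  simp [pvRefI, hk]

lemma B_spm : ∀ (cs : List Char) (m : Nat),
    ((pvSpm (m + 1) cs).length = m + 2 ∧ (pvSpm (m + 1) cs).getLastD [] = pvRefI cs (m : Int))
    ∨ ((pvSpm (m + 1) cs).length < m + 2 ∧ pvRefI cs (m : Int) = []) := by
  intro cs
  induction cs with
  | nil => intro m; right; simp [pvSpm, pvRefI]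
  | cons c rest ih =>
    intro m
    by_cases hc : c = ','
    · subst hc
      have hsp : pvSpm (m + 1) (',' :: rest) = [] :: pvSpm m rest := by simp [pvSpm]
      rw [hsp]
      cases m with
      | zero =>
        left
        rw [pvSpm_zero]
        simp [pvRefI]
      | succ m' =>
        have hcast : (((m' + 1 : Nat) : Int)) - 1 = (m' : Int) := by push_cast; ring
        rcases ih m' with ⟨hl, he⟩ | ⟨hl, he⟩
        · left
          constructor
          · simp [hl]
          · rw [List.getLastD_cons, pvRefI_comma rest _ (by omega), hcast]
            exact he
        · right
          constructor
          · simp only [List.length_cons]; omega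
          · rw [pvRefI_comma rest _ (by omega), hcast]
            exact he
    · simp only [pvSpm, if_neg hc]
      rcases ih m with ⟨hl, he⟩ | ⟨hl, he⟩
      · left
        constructor
        · simp [List.length_modifyHead, hl]
        · obtain ⟨h, t, hh⟩ := List.exists_cons_of_ne_nil (pvSpm_ne_nil (m + 1) rest)
          have ht : t ≠ [] := by
            intro h0
            rw [hh, h0] at hl
            simp at hl
          obtain ⟨t1, t2, htt⟩ := List.exists_cons_of_ne_nil ht
          rw [hh, htt] at he ⊢
          simp only [List.modifyHead, List.getLastD_cons] at he ⊢
          rw [he]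
          simp [pvRefI, hc]
      · right
        constructor
        · simpa [List.length_modifyHead] using hl
        · simpa [pvRefI, hc] using he

lemma pyGetD_neg_one_getLastD {α : Type} (xs : List α) (d : α) :
    PySem.List.pyGetD xs (-1) d = xs.getLastD d := by
  rw [PySem.List.pyGetD, PySem.List.pyGet?_neg_one, List.getLastD_eq_getLast?]

-- ===== VERDICT (by name: the statement is the Claim_ definition above) =====
theorem getAfterStr_spec : Claim_equal_getAfterStr := by
  intro line StylePos _
  unfold Spec_getAfterStr getAfterStr getAfterStr_alt
  simp only [splitOn_eq_pvSp]
  have hpos : 0 ≤ pvALoop StylePos (pvSp line.toList) 0 0 := pvALoop_nonneg _ _ _ _ le_rfl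
  rw [PySem.List.slice_from _ hpos, A_drop]
  by_cases hneg : StylePos < 0
  · rw [if_pos hneg, pvRefI_neg _ _ hneg]
  · rw [if_neg hneg]
    obtain ⟨m, rfl⟩ : ∃ m : Nat, StylePos = (m : Int) := ⟨StylePos.toNat, by omega⟩
    rw [splitOnMax_eq_pvSpm _ _ (by omega)]
    have hm : ((m : Int) + 1).toNat = m + 1 := by omega
    rw [hm]
    rcases B_spm line.toList m with ⟨hl, he⟩ | ⟨hl, he⟩
    · rw [if_pos (by rw [hl]; push_cast; ring)]
      rw [pyGetD_neg_one_getLastD _ _, he]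
    · rw [if_neg (by omega), he]
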